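-- pv_equiv track=rewrite | github.com/Dam-in/CodingTestPreparation | Step-By-Step Algorithm/STEP11 - 브루트포스.py | DecompositionSum
-- ===== SOURCE A (Python) =====
-- def DecompositionSum(num):
--     sum = num
--     while True:
--         if num <= 0:
--             break
--         sum += num % 10
--         num = num // 10
--     return sum
-- ===== SOURCE B (Python) =====
-- def DecompositionSum(num):
--     if num <= 0:
--         return num
--     return num + sum(int(c) for c in str(num))
-- ===== Notes on version B (the rewrite author's own statement) =====
-- stated objective: idiomatic
-- what changed: B replaces A's while-loop of mod/floordiv digit extraction by an early return for non-positive inputs plus a one-line sum of int(c) over the decimal string representation.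
import Mathlib
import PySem

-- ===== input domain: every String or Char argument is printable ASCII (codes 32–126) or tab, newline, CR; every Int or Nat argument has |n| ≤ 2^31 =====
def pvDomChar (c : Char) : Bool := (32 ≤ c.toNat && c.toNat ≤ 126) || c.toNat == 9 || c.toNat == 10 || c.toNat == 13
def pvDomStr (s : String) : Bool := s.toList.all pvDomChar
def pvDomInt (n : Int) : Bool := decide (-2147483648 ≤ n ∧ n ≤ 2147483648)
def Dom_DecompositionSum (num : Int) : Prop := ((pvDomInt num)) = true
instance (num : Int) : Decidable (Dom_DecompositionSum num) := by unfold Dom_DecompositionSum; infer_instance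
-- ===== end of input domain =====

-- B: early return for num <= 0, then num plus the sum of int(c) over str(num) — idiomatic, same cost.


-- ===== PORT A =====
-- termination measure fact for the loop below (cited by name in its decreasing_by)
theorem pvLoopA_dec (num : Int) (h : ¬ num ≤ 0) :
    (PySem.Int.floordiv num 10).toNat < num.toNat := by
  rw [PySem.Int.floordiv_eq_ediv_of_pos (by omega)]; omega

-- the 'while True: if num <= 0: break; sum += num % 10; num //= 10' loop
def pvLoopA (num acc : Int) : Int :=
  if num ≤ 0 then acc
  else pvLoopA (PySem.Int.floordiv num 10) (acc + PySem.Int.mod num 10)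
termination_by num.toNat
decreasing_by exact pvLoopA_dec num (by assumption)

def DecompositionSum (num : Int) : Int := pvLoopA num num

-- ===== PORT B =====
-- int(c) for a single character c (never fails on the digit characters B feeds it)
def pvCharVal (c : Char) : Int := (PySem.Int.ofChars? [c]).getD 0

def DecompositionSum_alt (num : Int) : Int :=
  if num ≤ 0 then num
  else num + ((PySem.Int.toStr num).toList.map pvCharVal).sum

-- ===== PRECONDITION & SPEC =====
def Spec_DecompositionSum (num : Int) (out : Int) : Prop := out = DecompositionSum_alt num
instance (num : Int) (out : Int) : Decidable (Spec_DecompositionSum num out) := by unfold Spec_DecompositionSum; infer_instance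

-- ===== CLAIM (what is proved, stated in full; the proofs are below) =====
def Claim_equal_DecompositionSum : Prop := ∀ (num : Int), Dom_DecompositionSum num → Spec_DecompositionSum num (DecompositionSum num)

-- ===== LEMMAS AND PROOFS =====

-- digit sum of a natural number, arithmetically
def pvDsum (n : Nat) : Int :=
  if n = 0 then 0 else (n % 10 : Nat) + pvDsum (n / 10)
termination_by n
decreasing_by omega

theorem pvCharVal_digitChar (d : Nat) (hd : d < 10) : pvCharVal (Nat.digitChar d) = d := by
  interval_cases d <;> decide

theorem pvDsum_lt_ten (n : Nat) (h : n < 10) : pvDsum n = n := by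
  rcases Nat.eq_zero_or_pos n with h0 | h0
  · subst h0; simp [pvDsum]
  · rw [pvDsum]
    have : n / 10 = 0 := by omega
    rw [this]
    simp [pvDsum]
    omega

theorem pvCore_sum (fuel : Nat) : ∀ (n : Nat) (ds : List Char), n < fuel →
    ((Nat.toDigitsCore 10 fuel n ds).map pvCharVal).sum = pvDsum n + (ds.map pvCharVal).sum := by
  induction fuel with
  | zero => intro n ds h; omega
  | succ fuel ih =>
    intro n ds h
    rw [Nat.toDigitsCore]
    by_cases h0 : n / 10 = 0
    · simp only [h0, if_pos]
      have hn10 : n < 10 := by omega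
      simp [pvCharVal_digitChar (n % 10) (by omega), pvDsum_lt_ten n hn10]
      rcases Nat.eq_zero_or_pos n with rfl | hp
      · simp
      · have : n % 10 = n := by omega
        omega
    · simp only [h0, if_false]
      rw [ih (n / 10) _ (by omega)]
      have hrec : pvDsum n = (n % 10 : Nat) + pvDsum (n / 10) := by
        rw [pvDsum]; simp only [if_neg (by omega : ¬ n = 0)]
      simp [pvCharVal_digitChar (n % 10) (by omega)]
      omega

theorem pvLoopA_nonneg (k : Nat) : ∀ (num acc : Int), num.toNat = k → 0 ≤ num →
    pvLoopA num acc = acc + pvDsum num.toNat := by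
  induction k using Nat.strong_induction_on with
  | _ k ih =>
    intro num acc hk hnn
    rw [pvLoopA]
    by_cases h : num ≤ 0
    · have : num = 0 := by omega
      simp [this, pvDsum]
    · rw [if_neg h]
      have h10 : PySem.Int.floordiv num 10 = num / 10 :=
        PySem.Int.floordiv_eq_ediv_of_pos (by omega)
      have hm10 : PySem.Int.mod num 10 = num % 10 :=
        PySem.Int.mod_eq_emod_of_pos (by omega)
      have hpos : 0 < num := by omega
      have hlt : (num / 10).toNat < k := by omega
      rw [h10, hm10, ih (num / 10).toNat hlt (num / 10) _ rfl (by positivity)]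
      have hrec : pvDsum num.toNat = (num.toNat % 10 : Nat) + pvDsum (num.toNat / 10) := by
        rw [pvDsum]; simp only [if_neg (by omega : ¬ num.toNat = 0)]
      have h1 : (num / 10).toNat = num.toNat / 10 := by omega
      have h2 : num % 10 = (num.toNat % 10 : Nat) := by omega
      rw [h1, h2, hrec]
      ring

-- ===== VERDICT (by name: the statement is the Claim_ definition above) =====
theorem DecompositionSum_spec : Claim_equal_DecompositionSum := by
  intro num _
  unfold Spec_DecompositionSum DecompositionSum DecompositionSum_alt
  by_cases h : num ≤ 0
  · rw [pvLoopA]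
    simp [h]
  · simp only [h, if_neg, not_false_iff]
    rw [pvLoopA_nonneg num.toNat num num rfl (by omega)]
    have hts : (PySem.Int.toStr num).toList = PySem.Int.toChars num := PySem.Int.toList_toStr num
    rw [hts]
    unfold PySem.Int.toChars
    simp only [if_neg (by omega : ¬ num < 0)]
    unfold Nat.toDigits
    rw [pvCore_sum (num.toNat + 1) num.toNat [] (by omega)]
    simp
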